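-- pv_equiv track=rewrite | github.com/abeelen/aoc | 2020/day11/day11.py | draw_layout
-- ===== SOURCE A (Python) =====
-- from typing import Dict, List
-- from collections import namedtuple
--
-- Pos = namedtuple('Pos', ['x','y'])
--
-- def draw_layout(layout: Dict[Pos, int], nx, ny) -> List[str]:
--     screen = []
--     for i in range(ny):
--         line = ""
--         for j in range(nx):
--             pos = Pos(j,i)
--             if pos in layout:
--                 line += '#' if layout[pos] else 'L'
--             else:
--                 line += '.'
--         screen.append(line)
--     return screen
-- ===== SOURCE B (Python) =====
-- from typing import Dict, List
-- from collections import namedtuple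
--
-- Pos = namedtuple('Pos', ['x', 'y'])
--
-- # B: scatter the dict entries into a preallocated 2D character buffer instead of
-- # probing the dict for every cell; join each row once at the end.
-- def draw_layout(layout: Dict[Pos, int], nx, ny) -> List[str]:
--     grid = [['.'] * nx for _ in range(ny)]
--     for (x, y), val in layout.items():
--         if 0 <= x < nx and 0 <= y < ny:
--             grid[y][x] = '#' if val else 'L'
--     return [''.join(row) for row in grid]
-- ===== Notes on version B (the rewrite author's own statement) =====
-- stated objective: alternative
-- what changed: B preallocates an ny-by-nx character grid and scatters the dict entries into it (ignoring out-of-range positions), joining rows once, instead of A's per-cell dict membership probe and string concatenation.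
import Mathlib
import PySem

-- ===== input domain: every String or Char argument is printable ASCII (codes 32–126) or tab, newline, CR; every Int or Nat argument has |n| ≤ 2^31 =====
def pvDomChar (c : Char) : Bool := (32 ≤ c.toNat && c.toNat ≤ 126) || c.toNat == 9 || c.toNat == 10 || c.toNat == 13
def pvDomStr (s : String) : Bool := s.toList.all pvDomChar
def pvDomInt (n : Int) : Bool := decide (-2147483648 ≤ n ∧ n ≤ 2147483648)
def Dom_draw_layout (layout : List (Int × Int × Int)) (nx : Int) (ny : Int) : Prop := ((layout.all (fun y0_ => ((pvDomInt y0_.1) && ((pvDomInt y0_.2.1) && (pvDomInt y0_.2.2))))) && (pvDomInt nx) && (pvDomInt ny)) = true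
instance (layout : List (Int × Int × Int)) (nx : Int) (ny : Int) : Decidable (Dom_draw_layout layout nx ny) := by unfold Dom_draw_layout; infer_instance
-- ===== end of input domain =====

-- B renders the layout by scattering the dict entries into a preallocated grid instead of
-- probing the dict for every cell; equivalence is proved for all inputs (no precondition).

-- ===== PORT A =====
-- the dict argument, received as an association list, materialised with Python's dict semantics
def pvDictOf (layout : List (Int × Int × Int)) : PySem.Dict (Int × Int) Int :=
  layout.foldl (fun d e => d.insert (e.1, e.2.1) e.2.2) PySem.Dict.empty

def draw_layout (layout : List (Int × Int × Int)) (nx : Int) (ny : Int) : List String :=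
  let d := pvDictOf layout
  (PySem.List.pyRange 0 ny 1).foldl (fun screen i =>
    screen ++ [(PySem.List.pyRange 0 nx 1).foldl (fun line j =>
      match d.get? (j, i) with
      | some v => line ++ (if v ≠ 0 then "#" else "L")
      | none   => line ++ ".") ""]) []

-- ===== PORT B =====
def draw_layout_alt (layout : List (Int × Int × Int)) (nx : Int) (ny : Int) : List String :=
  let grid0 : List (List Char) := List.replicate ny.toNat (List.replicate nx.toNat '.')
  let grid := layout.foldl (fun g e =>
    if 0 ≤ e.1 ∧ e.1 < nx ∧ 0 ≤ e.2.1 ∧ e.2.1 < ny then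
      g.modify e.2.1.toNat (fun row => row.set e.1.toNat (if e.2.2 ≠ 0 then '#' else 'L'))
    else g) grid0
  grid.map (fun row => String.ofList row)

-- ===== PRECONDITION & SPEC =====
def Spec_draw_layout (layout : List (Int × Int × Int)) (nx : Int) (ny : Int) (out : List String) : Prop := out = draw_layout_alt layout nx ny
instance (layout : List (Int × Int × Int)) (nx : Int) (ny : Int) (out : List String) : Decidable (Spec_draw_layout layout nx ny out) := by unfold Spec_draw_layout; infer_instance

-- ===== CLAIM (what is proved, stated in full; the proofs are below) =====
def Claim_equal_draw_layout : Prop := ∀ (layout : List (Int × Int × Int)) (nx : Int) (ny : Int), Dom_draw_layout layout nx ny → Spec_draw_layout layout nx ny (draw_layout layout nx ny)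

-- ===== LEMMAS AND PROOFS =====

-- the character A emits for cell (j, i)
def pvCell (d : PySem.Dict (Int × Int) Int) (j i : Int) : Char :=
  match d.get? (j, i) with
  | some v => if v ≠ 0 then '#' else 'L'
  | none   => '.'

-- the character sitting at row yi, column xi of B's grid
def pvCellAt (g : List (List Char)) (yi xi : Nat) : Char := (g.getD yi []).getD xi ' '

-- A's inner loop builds exactly the row of pvCell characters
lemma pv_line (d : PySem.Dict (Int × Int) Int) (i : Int) :
    ∀ (l : List Int) (s : List Char),
      l.foldl (fun line j =>
        match d.get? (j, i) with
        | some v => line ++ (if v ≠ 0 then "#" else "L")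
        | none   => line ++ ".") (String.ofList s)
      = String.ofList (s ++ l.map (fun j => pvCell d j i)) := by
  intro l
  induction l with
  | nil => intro s; simp
  | cons a t ih =>
    intro s
    have hstep : (match d.get? (a, i) with
        | some v => String.ofList s ++ (if v ≠ 0 then "#" else "L")
        | none   => String.ofList s ++ ".")
        = String.ofList (s ++ [pvCell d a i]) := by
      unfold pvCell
      cases d.get? (a, i) with
      | none => rw [String.ofList_append]
      | some v =>
        dsimp only
        by_cases hv : v ≠ 0
        · rw [if_pos hv, if_pos hv, String.ofList_append]
        · rw [if_neg hv, if_neg hv, String.ofList_append]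
    simp only [List.foldl_cons, hstep, ih, List.map_cons]
    simp

lemma pv_A_eq (layout : List (Int × Int × Int)) (nx ny : Int) :
    draw_layout layout nx ny
    = (PySem.List.pyRange 0 ny 1).map (fun i =>
        String.ofList ((PySem.List.pyRange 0 nx 1).map (fun j => pvCell (pvDictOf layout) j i))) := by
  unfold draw_layout
  rw [PySem.List.foldl_append_singleton_eq_map
    (fun i => (PySem.List.pyRange 0 nx 1).foldl (fun line j =>
      match (pvDictOf layout).get? (j, i) with
      | some v => line ++ (if v ≠ 0 then "#" else "L")
      | none   => line ++ ".") "")]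
  simp only [List.nil_append]
  apply List.map_congr_left
  intro i _
  have := pv_line (pvDictOf layout) i (PySem.List.pyRange 0 nx 1) []
  simpa using this

-- B's fold preserves: grid shape ny × nx, and every in-range cell shows pvCell of the dict built so far
lemma pv_grid_inv (nx ny : Int) :
    ∀ (L : List (Int × Int × Int)) (g : List (List Char)) (d : PySem.Dict (Int × Int) Int),
      g.length = ny.toNat →
      (∀ yi, yi < ny.toNat → (g.getD yi []).length = nx.toNat) →
      (∀ yi xi, yi < ny.toNat → xi < nx.toNat → pvCellAt g yi xi = pvCell d (xi : Int) (yi : Int)) →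
      (L.foldl (fun g e =>
          if 0 ≤ e.1 ∧ e.1 < nx ∧ 0 ≤ e.2.1 ∧ e.2.1 < ny then
            g.modify e.2.1.toNat (fun row => row.set e.1.toNat (if e.2.2 ≠ 0 then '#' else 'L'))
          else g) g).length = ny.toNat ∧
      (∀ yi, yi < ny.toNat → ((L.foldl (fun g e =>
          if 0 ≤ e.1 ∧ e.1 < nx ∧ 0 ≤ e.2.1 ∧ e.2.1 < ny then
            g.modify e.2.1.toNat (fun row => row.set e.1.toNat (if e.2.2 ≠ 0 then '#' else 'L'))
          else g) g).getD yi []).length = nx.toNat) ∧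
      (∀ yi xi, yi < ny.toNat → xi < nx.toNat →
        pvCellAt (L.foldl (fun g e =>
          if 0 ≤ e.1 ∧ e.1 < nx ∧ 0 ≤ e.2.1 ∧ e.2.1 < ny then
            g.modify e.2.1.toNat (fun row => row.set e.1.toNat (if e.2.2 ≠ 0 then '#' else 'L'))
          else g) g) yi xi
        = pvCell (L.foldl (fun d e => d.insert (e.1, e.2.1) e.2.2) d) (xi : Int) (yi : Int)) := by
  intro L
  induction L with
  | nil => intro g d h1 h2 h3; exact ⟨h1, h2, h3⟩
  | cons e t ih =>
    intro g d h1 h2 h3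
    obtain ⟨x, y, v⟩ := e
    by_cases hr : 0 ≤ x ∧ x < nx ∧ 0 ≤ y ∧ y < ny
    · -- in range: the grid cell (y, x) is overwritten, matching the dict insert
      simp only [List.foldl_cons, if_pos hr]
      set ch := if v ≠ 0 then '#' else 'L' with hch
      set g' := g.modify y.toNat (fun row => row.set x.toNat ch) with hg'
      have hyn : y.toNat < ny.toNat := by omega
      have hxn : x.toNat < nx.toNat := by omega
      have hlen' : g'.length = ny.toNat := by simp [hg', h1]
      have hrow' : ∀ yi, yi < ny.toNat → (g'.getD yi []).length = nx.toNat := by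
        intro yi hyi
        have hyig : yi < g'.length := by omega
        have hyig0 : yi < g.length := by omega
        rw [List.getD_eq_getElem _ _ hyig]
        simp only [hg', List.getElem_modify]
        split
        · next h =>
          rw [List.length_set, ← List.getD_eq_getElem _ [] hyig0]
          exact h2 yi hyi
        · rw [← List.getD_eq_getElem _ [] hyig0]; exact h2 yi hyi
      have hcell' : ∀ yi xi, yi < ny.toNat → xi < nx.toNat →
          pvCellAt g' yi xi = pvCell (d.insert (x, y) v) (xi : Int) (yi : Int) := by
        intro yi xi hyi hxi
        have hyig : yi < g.length := by omega
        have hxig : xi < (g.getD yi []).length := by rw [h2 yi hyi]; exact hxi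
        unfold pvCellAt
        have hyg' : yi < g'.length := by rw [hg', List.length_modify, h1]; exact hyi
        rw [List.getD_eq_getElem _ _ hyg']
        simp only [hg', List.getElem_modify]
        by_cases hy : y.toNat = yi
        · rw [if_pos hy]
          have hxset : xi < (g[yi].set x.toNat ch).length := by
            rw [List.length_set, ← List.getD_eq_getElem _ [] hyig]; exact hxig
          rw [List.getD_eq_getElem _ _ hxset, List.getElem_set]
          by_cases hx : x.toNat = xi
          · rw [if_pos hx]
            have hkey : ((xi : Int), (yi : Int)) = ((x, y) : Int × Int) := by
              have : (xi : Int) = x := by omega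
              have : (yi : Int) = y := by omega
              simp_all
            unfold pvCell
            rw [hkey, PySem.Dict.get?_insert_self]
          · rw [if_neg hx]
            have hne : ((xi : Int), (yi : Int)) ≠ ((x, y) : Int × Int) := by
              intro hc
              apply hx
              have : (xi : Int) = x := congrArg Prod.fst hc
              omega
            have hxig2 : xi < g[yi].length := by
              rw [← List.getD_eq_getElem _ [] hyig]; exact hxig
            have hold := h3 yi xi hyi hxi
            unfold pvCellAt at hold
            rw [List.getD_eq_getElem _ _ hyig, List.getD_eq_getElem _ _ hxig2] at hold
            rw [hold]
            unfold pvCell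
            rw [PySem.Dict.get?_insert_of_ne _ _ hne]
        · rw [if_neg hy]
          have hne : ((xi : Int), (yi : Int)) ≠ ((x, y) : Int × Int) := by
            intro hc
            apply hy
            have : (yi : Int) = y := congrArg Prod.snd hc
            omega
          have hold := h3 yi xi hyi hxi
          unfold pvCellAt at hold
          rw [List.getD_eq_getElem _ _ hyig] at hold
          rw [hold]
          unfold pvCell
          rw [PySem.Dict.get?_insert_of_ne _ _ hne]
      exact ih g' (d.insert (x, y) v) hlen' hrow' hcell'
    · -- out of range: grid unchanged; the inserted key is never looked up in range
      simp only [List.foldl_cons, if_neg hr]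
      have hcell' : ∀ yi xi, yi < ny.toNat → xi < nx.toNat →
          pvCellAt g yi xi = pvCell (d.insert (x, y) v) (xi : Int) (yi : Int) := by
        intro yi xi hyi hxi
        have hne : ((xi : Int), (yi : Int)) ≠ ((x, y) : Int × Int) := by
          intro hc
          have hx0 : (xi : Int) = x := congrArg Prod.fst hc
          have hy0 : (yi : Int) = y := congrArg Prod.snd hc
          omega
        rw [h3 yi xi hyi hxi]
        unfold pvCell
        rw [PySem.Dict.get?_insert_of_ne _ _ hne]
      exact ih g (d.insert (x, y) v) h1 h2 hcell'

-- ===== VERDICT (by name: the statement is the Claim_ definition above) =====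
theorem draw_layout_spec : Claim_equal_draw_layout := by
  intro layout nx ny _
  unfold Spec_draw_layout
  rw [pv_A_eq]
  have h0len : (List.replicate ny.toNat (List.replicate nx.toNat '.')).length = ny.toNat := by simp
  have h0row : ∀ yi, yi < ny.toNat →
      ((List.replicate ny.toNat (List.replicate nx.toNat '.')).getD yi []).length = nx.toNat := by
    intro yi hyi
    have h1 : yi < (List.replicate ny.toNat (List.replicate nx.toNat ('.' : Char))).length := by
      simpa using hyi
    rw [List.getD_eq_getElem _ _ h1, List.getElem_replicate]
    simp
  have h0cell : ∀ yi xi, yi < ny.toNat → xi < nx.toNat →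
      pvCellAt (List.replicate ny.toNat (List.replicate nx.toNat '.')) yi xi
      = pvCell PySem.Dict.empty (xi : Int) (yi : Int) := by
    intro yi xi hyi hxi
    unfold pvCellAt pvCell
    have h1 : yi < (List.replicate ny.toNat (List.replicate nx.toNat ('.' : Char))).length := by
      simpa using hyi
    rw [List.getD_eq_getElem _ _ h1, List.getElem_replicate]
    have h2 : xi < (List.replicate nx.toNat ('.' : Char)).length := by simpa using hxi
    rw [List.getD_eq_getElem _ _ h2, List.getElem_replicate, PySem.Dict.get?_empty]
  obtain ⟨hlen, hrow, hcell⟩ :=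
    pv_grid_inv nx ny layout (List.replicate ny.toNat (List.replicate nx.toNat '.'))
      PySem.Dict.empty h0len h0row h0cell
  have hB : draw_layout_alt layout nx ny
      = (layout.foldl (fun g e =>
          if 0 ≤ e.1 ∧ e.1 < nx ∧ 0 ≤ e.2.1 ∧ e.2.1 < ny then
            g.modify e.2.1.toNat (fun row => row.set e.1.toNat (if e.2.2 ≠ 0 then '#' else 'L'))
          else g) (List.replicate ny.toNat (List.replicate nx.toNat '.'))).map
          (fun row => String.ofList row) := rfl
  rw [hB]
  set G := layout.foldl (fun g e =>
      if 0 ≤ e.1 ∧ e.1 < nx ∧ 0 ≤ e.2.1 ∧ e.2.1 < ny then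
        g.modify e.2.1.toNat (fun row => row.set e.1.toNat (if e.2.2 ≠ 0 then '#' else 'L'))
      else g) (List.replicate ny.toNat (List.replicate nx.toNat '.')) with hG
  unfold pvDictOf
  apply List.ext_getElem
  · rw [List.length_map, List.length_map, PySem.List.length_pyRange_one, hlen]
    omega
  · intro k h1k h2k
    have hkG : k < G.length := by rw [List.length_map] at h2k; exact h2k
    have hk : k < ny.toNat := by rw [hlen] at hkG; exact hkG
    rw [List.getElem_map, List.getElem_map, PySem.List.getElem_pyRange_one]
    apply congrArg String.ofList
    have hGk : G[k].length = nx.toNat := by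
      rw [← List.getD_eq_getElem _ [] hkG]; exact hrow k hk
    apply List.ext_getElem
    · rw [List.length_map, PySem.List.length_pyRange_one, hGk]; omega
    · intro m h1m h2m
      have hm : m < nx.toNat := by rw [hGk] at h2m; exact h2m
      rw [List.getElem_map, PySem.List.getElem_pyRange_one]
      simp only [zero_add]
      have hc := hcell k m hk hm
      unfold pvCellAt at hc
      rw [List.getD_eq_getElem _ _ hkG] at hc
      rw [List.getD_eq_getElem _ _ h2m] at hc
      rw [← hc]
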